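-- pv_equiv track=rewrite | github.com/caejk/fea_tools | SearchNestedIncludes.py | get_dict_parent_children
-- ===== SOURCE A (Python) =====
-- def get_dict_parent_children(ListOfTuples):
--     IncDict = {}
--     Parents = list(set([x[1] for x in ListOfTuples]))
--     for p in Parents:
--         ChildList = []
--         for y in ListOfTuples:
--             if p == y[1]:
--                 ChildList.append(y[0])
--         IncDict[p] = ChildList
--     return IncDict
-- ===== SOURCE B (Python) =====
-- def get_dict_parent_children(ListOfTuples):
--     IncDict = {}
--     for child, parent in ListOfTuples:
--         IncDict.setdefault(parent, []).append(child)
--     return IncDict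
-- ===== Notes on version B (the rewrite author's own statement) =====
-- stated objective: faster
-- what changed: Replaces the per-parent rescan of the whole list (one full pass for every distinct parent) by a single pass that appends each child to a dict entry keyed by its parent via setdefault.
import Mathlib
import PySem

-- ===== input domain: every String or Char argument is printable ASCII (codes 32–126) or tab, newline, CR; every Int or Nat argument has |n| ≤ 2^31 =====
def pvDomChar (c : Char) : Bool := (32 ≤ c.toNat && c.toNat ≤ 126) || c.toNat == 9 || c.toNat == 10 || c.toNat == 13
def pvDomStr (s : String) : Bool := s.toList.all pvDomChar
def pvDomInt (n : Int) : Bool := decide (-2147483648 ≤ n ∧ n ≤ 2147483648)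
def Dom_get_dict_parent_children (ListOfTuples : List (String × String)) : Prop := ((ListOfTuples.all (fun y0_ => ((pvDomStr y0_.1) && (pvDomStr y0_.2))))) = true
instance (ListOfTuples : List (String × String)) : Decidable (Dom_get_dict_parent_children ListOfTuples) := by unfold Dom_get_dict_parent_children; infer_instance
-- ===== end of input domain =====

-- B replaces A's full rescan of the input per distinct parent by one pass appending
-- each child to a dict entry keyed by its parent (objective: faster, O(P*N) → O(N)).
-- The kept key order is first-occurrence order; Python's dict result is compared as a dict
-- (key order ignored), matching A's arbitrary set iteration order.

-- ===== PORT A =====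
def get_dict_parent_children (ListOfTuples : List (String × String)) : List (String × List String) :=
  let IncDict : PySem.Dict String (List String) := PySem.Dict.empty
  let Parents := PySem.Set.ofList (ListOfTuples.map (fun x => x.2))
  (Parents.foldl (fun IncDict p =>
    let ChildList := ListOfTuples.foldl (fun cl y => if p == y.2 then cl ++ [y.1] else cl) []
    IncDict.insert p ChildList) IncDict).items

-- ===== PORT B =====
def get_dict_parent_children_alt (ListOfTuples : List (String × String)) : List (String × List String) :=
  (ListOfTuples.foldl (fun d y => d.modify y.2 [] (fun l => l ++ [y.1]))
    (PySem.Dict.empty : PySem.Dict String (List String))).items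

-- ===== PRECONDITION & SPEC =====
def Spec_get_dict_parent_children (ListOfTuples : List (String × String)) (out : List (String × List String)) : Prop := out = get_dict_parent_children_alt ListOfTuples
instance (ListOfTuples : List (String × String)) (out : List (String × List String)) : Decidable (Spec_get_dict_parent_children ListOfTuples out) := by unfold Spec_get_dict_parent_children; infer_instance

-- ===== CLAIM (what is proved, stated in full; the proofs are below) =====
def Claim_equal_get_dict_parent_children : Prop := ∀ (ListOfTuples : List (String × String)), Dom_get_dict_parent_children ListOfTuples → Spec_get_dict_parent_children ListOfTuples (get_dict_parent_children ListOfTuples)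

-- ===== LEMMAS AND PROOFS =====

theorem gdpc_eq (L : List (String × String)) :
    get_dict_parent_children L = get_dict_parent_children_alt L := by
  unfold get_dict_parent_children get_dict_parent_children_alt
  set D := L.foldl (fun d y => d.modify y.2 [] (fun l => l ++ [y.1]))
    (PySem.Dict.empty : PySem.Dict String (List String)) with hD
  have hnd : D.keys.Nodup := by
    rw [hD]
    exact PySem.Dict.nodup_keys_foldl_modify_key L (fun y => y.2) _ _ _ PySem.Dict.nodup_keys_empty
  have hkeys : D.keys = PySem.Set.ofList (L.map (fun x => x.2)) := by
    rw [hD, PySem.Dict.keys_foldl_modify_key, PySem.Dict.keys_empty]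
    rfl
  have hA : ((PySem.Set.ofList (L.map (fun x => x.2))).foldl (fun d p =>
      d.insert p (L.foldl (fun cl y => if p == y.2 then cl ++ [y.1] else cl) []))
      (PySem.Dict.empty : PySem.Dict String (List String))).items
      = (PySem.Set.ofList (L.map (fun x => x.2))).map (fun p =>
          (p, L.foldl (fun cl y => if p == y.2 then cl ++ [y.1] else cl) [])) := by
    have := PySem.Dict.items_foldl_insert_fresh
      (l := PySem.Set.ofList (L.map (fun x => x.2)))
      (k := fun p => p)
      (v := fun p => L.foldl (fun cl y => if p == y.2 then cl ++ [y.1] else cl) [])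
      (d := (PySem.Dict.empty : PySem.Dict String (List String)))
      (by intro a _; exact PySem.Dict.contains_empty a)
      (by simp [PySem.Set.nodup_ofList])
    simpa using this
  have hgetD : ∀ p, D.getD p [] = (L.filter (fun y => p == y.2)).map (fun y => y.1) := by
    intro p
    have hswap : D = (L.map Prod.swap).foldl (fun d q => d.modify q.1 [] (fun l => l ++ [q.2]))
        (PySem.Dict.empty : PySem.Dict String (List String)) := by
      rw [hD, List.foldl_map]
      simp [Prod.swap]
    rw [hswap, PySem.Dict.getD_foldl_modify_append, PySem.Dict.getD_empty]
    simp only [List.filter_map, List.map_map, List.nil_append]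
    apply congrArg
    apply List.filter_congr
    intro y _
    simp [Function.comp, Prod.swap, BEq.comm]
  have hB : D.items = D.keys.map (fun k => (k, D.getD k [])) :=
    PySem.Dict.items_eq_map_keys D hnd []
  simp only [hA, hB, hkeys]
  apply List.map_congr_left
  intro p _
  rw [hgetD p]
  have hcl := PySem.List.foldl_append_if (p := fun y => (p == y.2)) (f := fun y => y.1) (l := L) (acc := ([] : List String))
  simp only [List.nil_append] at hcl
  rw [hcl]

-- ===== VERDICT (by name: the statement is the Claim_ definition above) =====
theorem get_dict_parent_children_spec : Claim_equal_get_dict_parent_children := by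
  intro L _
  unfold Spec_get_dict_parent_children
  exact gdpc_eq L
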